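-- pv_equiv track=rewrite | github.com/CuongNguyenDang/DecisionTree | DecisionTree.py | isLeafNode
-- ===== SOURCE A (Python) =====
-- DEFAULT_LABEL = 0
--
-- EPSILON = 3
--
-- MIN_SIZE = 10
--
-- def isLeafNode(listLabel):
--     """return label if afford"""
--
--     if len(listLabel) < MIN_SIZE: return DEFAULT_LABEL
--     listLabel = list(listLabel)
--     s = set(listLabel)
--     count = []
--     for i in s:
--         _count = 0
--         for j in listLabel:
--             if j == i: _count = _count + 1
--         count.append((_count,i))
--     count.sort()
--     count.reverse()
--     if count[0][0] >= len(listLabel) - EPSILON: return count[0][1]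
--     return -1
-- ===== SOURCE B (Python) =====
-- DEFAULT_LABEL = 0
--
-- EPSILON = 3
--
-- MIN_SIZE = 10
--
-- def isLeafNode(listLabel):
--     """return label if afford"""
--     labels = list(listLabel)
--     n = len(labels)
--     if n < MIN_SIZE:
--         return DEFAULT_LABEL
--     counts = {}
--     for x in labels:
--         counts[x] = counts.get(x, 0) + 1
--     # at most one label can reach the threshold n - EPSILON (> n/2 since n >= 10),
--     # so returning the first such label matches A's sort-based tie-breaking
--     for label, c in counts.items():
--         if c >= n - EPSILON:
--             return label
--     return -1
-- ===== Notes on version B (the rewrite author's own statement) =====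
-- stated objective: faster
-- what changed: A counts each distinct label by a full rescan of the list and then sorts the (count,label) pairs to pick the top one; B builds a counter dict in one pass and returns the first label whose count reaches the n-EPSILON threshold (unique since the threshold exceeds n/2), with no rescans and no sort.
import Mathlib
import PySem

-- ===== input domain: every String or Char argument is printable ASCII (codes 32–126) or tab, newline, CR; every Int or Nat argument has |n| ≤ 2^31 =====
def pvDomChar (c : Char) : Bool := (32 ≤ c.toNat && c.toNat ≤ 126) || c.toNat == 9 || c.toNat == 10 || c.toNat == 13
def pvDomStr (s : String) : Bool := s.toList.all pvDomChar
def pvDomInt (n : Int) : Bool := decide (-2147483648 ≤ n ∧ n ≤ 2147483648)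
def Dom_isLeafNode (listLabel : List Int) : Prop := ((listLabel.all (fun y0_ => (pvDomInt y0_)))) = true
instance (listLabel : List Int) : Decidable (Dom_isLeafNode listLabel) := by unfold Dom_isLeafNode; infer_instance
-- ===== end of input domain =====

-- B replaces A's per-distinct-label rescans + sort by a one-pass counter dict and a
-- single threshold scan (the threshold exceeds n/2, so at most one label can reach it): faster.

-- ===== PORT A =====
-- transliteration of A: early DEFAULT_LABEL guard, set of labels, a (count, label) pair per
-- distinct label built by rescanning the list, sort ascending, reverse, threshold test on the head.
def isLeafNode (listLabel : List Int) : Int :=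
  if listLabel.length < 10 then 0   -- MIN_SIZE = 10, DEFAULT_LABEL = 0
  else
    let s : PySem.Set Int := PySem.Set.ofList listLabel
    let count : List (Int × Int) :=
      s.foldl (fun acc i =>
        let c : Int := listLabel.foldl (fun c j => if j == i then c + 1 else c) 0
        acc ++ [(c, i)]) []
    let count2 := (PySem.List.sorted2 count Prod.fst Prod.snd).reverse   -- count.sort(); count.reverse()
    match count2 with
    | [] => 0          -- unreachable: listLabel has ≥ 10 elements, so count2 ≠ []
    | (c, i) :: _ => if c ≥ (listLabel.length : Int) - 3 then i else -1  -- EPSILON = 3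

-- ===== PORT B =====
-- transliteration of Source B: one-pass dict counter, then return the first label at the threshold.
def isLeafNode_alt (listLabel : List Int) : Int :=
  if listLabel.length < 10 then 0
  else
    let counts : PySem.Dict Int Int :=
      listLabel.foldl (fun d x => d.insert x (d.getD x 0 + 1)) PySem.Dict.empty
    match counts.items.find? (fun p => (listLabel.length : Int) - 3 ≤ p.2) with
    | some p => p.1
    | none => -1

-- ===== PRECONDITION & SPEC =====
def Spec_isLeafNode (listLabel : List Int) (out : Int) : Prop := out = isLeafNode_alt listLabel
instance (listLabel : List Int) (out : Int) : Decidable (Spec_isLeafNode listLabel out) := by unfold Spec_isLeafNode; infer_instance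

-- ===== CLAIM (what is proved, stated in full; the proofs are below) =====
def Claim_equal_isLeafNode : Prop := ∀ (listLabel : List Int), Dom_isLeafNode listLabel → Spec_isLeafNode listLabel (isLeafNode listLabel)

-- ===== LEMMAS AND PROOFS =====

-- counts of two distinct values never exceed the length
theorem pv_count_add_count_le (x y : Int) (hxy : x ≠ y) (l : List Int) :
    l.count x + l.count y ≤ l.length := by
  induction l with
  | nil => simp
  | cons a t ih =>
    simp only [List.count_cons, List.length_cons, beq_iff_eq]
    by_cases hx : a = x <;> by_cases hy : a = y <;> simp_all <;> omega

-- A's ascending tuple sort is `sorted` under the lexicographic key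
theorem pv_sorted2_eq (xs : List (Int × Int)) :
    PySem.List.sorted2 xs Prod.fst Prod.snd
      = PySem.List.sorted xs (fun p => toLex p) := by
  unfold PySem.List.sorted2 PySem.List.sorted
  simp only [if_neg (by decide : ¬ ((false : Bool) = true))]
  congr 1
  funext acc x
  congr 1
  funext a b
  have hlex : (toLex a < toLex b) ↔ (a.1 < b.1 ∨ a.1 = b.1 ∧ a.2 < b.2) := Prod.Lex.lt_iff
  rcases lt_trichotomy a.1 b.1 with h | h | h <;>
    by_cases h2 : a.2 < b.2 <;>
      simp [hlex, h, h2, not_lt_of_gt] ; omega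

-- ===== VERDICT (by name: the statement is the Claim_ definition above) =====
theorem isLeafNode_spec : Claim_equal_isLeafNode := by
  intro l _
  unfold Spec_isLeafNode isLeafNode isLeafNode_alt
  by_cases hlen : l.length < 10
  · simp [hlen]
  · simp only [if_neg hlen]
    -- B's dict is the counter; its items are (label, count) over the distinct labels
    rw [PySem.Dict.foldl_insert_getD_add_one_eq_counter, PySem.Dict.items_counter,
        List.find?_map]
    -- A's count list is the (count, label) pairs over the distinct labels
    have hinner : ∀ i : Int,
        (List.foldl (fun c j => if (j == i) = true then c + 1 else c) (0:Int) l)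
          = ((l.count i : Int)) := by
      intro i; rw [PySem.List.foldl_beq_add_one]; omega
    have hcount :
        (PySem.Set.ofList l).foldl (fun acc i =>
            acc ++ [((List.foldl (fun c j => if (j == i) = true then c + 1 else c) (0:Int) l), i)]) []
          = (PySem.Set.ofList l).map (fun i => ((l.count i : Int), i)) := by
      simp only [hinner]
      exact PySem.List.foldl_append_singleton_eq_map (fun i => ((l.count i : Int), i)) _ []
    simp only [hcount, pv_sorted2_eq]
    set n : Int := (l.length : Int) with hn
    set s := PySem.Set.ofList l with hs
    set L := PySem.List.sorted (s.map fun i => ((l.count i : Int), i)) (fun p => toLex p) with hL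
    have hpw : L.reverse.Pairwise (fun a b : Int × Int => toLex b ≤ toLex a) := by
      rw [List.pairwise_reverse]
      exact PySem.List.sorted_pairwise _ _
    cases hrev : L.reverse with
    | nil =>
      exfalso
      have hLnil : L = [] := by
        have := congrArg List.reverse hrev
        simpa using this
      rw [hL, PySem.List.sorted_eq_nil_iff, List.map_eq_nil_iff] at hLnil
      cases hl : l with
      | nil => rw [hl] at hlen; simp at hlen
      | cons a t =>
        have : a ∈ s := by rw [hs, PySem.Set.mem_ofList, hl]; exact List.mem_cons_self
        rw [hLnil] at this; exact List.not_mem_nil this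
    | cons hd tl =>
      -- the head of the reversed sorted list is a lex-maximal pair
      have hmax : ∀ p ∈ s.map (fun i => ((l.count i : Int), i)), toLex p ≤ toLex hd := by
        intro p hp
        have hpL : p ∈ L.reverse := by
          rw [List.mem_reverse, hL, PySem.List.mem_sorted]; exact hp
        rw [hrev] at hpL
        rcases List.mem_cons.mp hpL with h | h
        · rw [h]
        · rw [hrev] at hpw; exact List.rel_of_pairwise_cons hpw h
      have hhd : hd ∈ s.map (fun i => ((l.count i : Int), i)) := by
        have : hd ∈ L.reverse := by rw [hrev]; exact List.mem_cons_self
        rw [List.mem_reverse, hL, PySem.List.mem_sorted] at this; exact this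
      obtain ⟨x, hxs, hx⟩ := List.mem_map.mp hhd
      -- case on B's scan for a label at the threshold
      cases hf : s.find? ((fun p : Int × Int => decide (n - 3 ≤ p.2)) ∘ fun k => (k, (l.count k : Int))) with
      | none =>
        have hnone : ∀ k ∈ s, ¬ (n - 3 ≤ (l.count k : Int)) := by
          intro k hk
          have := List.find?_eq_none.mp hf k hk
          simpa using this
        rw [← hx]
        simp only [ge_iff_le, Option.map_none]
        rw [if_neg (hnone x hxs)]
      | some y =>
        have hypred : n - 3 ≤ (l.count y : Int) := by
          have := List.find?_some hf
          simpa using this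
        have hys : y ∈ s := List.mem_of_find?_eq_some hf
        have hxy : x = y := by
          by_contra hne
          have hyL : toLex ((l.count y : Int), y) ≤ toLex ((l.count x : Int), x) := by
            rw [hx]
            exact hmax _ (List.mem_map.mpr ⟨y, hys, rfl⟩)
          have hle : (l.count y : Int) ≤ (l.count x : Int) := by
            rcases Prod.Lex.le_iff.mp hyL with h | h
            · exact le_of_lt h
            · exact le_of_eq h.1
          have hsum : l.count x + l.count y ≤ l.length := pv_count_add_count_le x y hne l
          omega
        rw [← hx, hxy]
        simp only [ge_iff_le, Option.map_some]
        rw [if_pos hypred]
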